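-- pv_equiv track=rewrite | github.com/brendanxwhitaker/telephone | telephone/all_wordifications.py | compute_vocab_map
-- ===== SOURCE A (Python) =====
-- from typing import Set, Dict, List, Tuple
--
-- def compute_vocab_map(
--     vocabulary: Set[str], letter_map: Dict[str, str]
-- ) -> Dict[str, List[str]]:
--     """
--     Computes hashes of each word in ``vocabulary`` and maps the hashes to equivalence
--     classes of words under the hashing function given by ``letter_map``.
--     """
--     # Construct vocab_map.
--     vocab_map: Dict[str, List[str]] = {}
--     for token in vocabulary:
--         uppercased_token = token.upper()
--         tokenhash = "".join([letter_map[char] for char in uppercased_token])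
--         if tokenhash in vocab_map:
--             vocab_map[tokenhash].append(uppercased_token)
--         else:
--             vocab_map[tokenhash] = [uppercased_token]
--
--     return vocab_map
-- ===== SOURCE B (Python) =====
-- def _hash(letter_map, word):
--     return "".join([letter_map[char] for char in word])
--
-- def compute_vocab_map(vocabulary, letter_map):
--     """
--     Two-pass re-implementation: compute all (hash, uppercased) pairs once,
--     dedup the hashes in first-occurrence order, then build each equivalence
--     class with a comprehension over the pair list.
--     """
--     pairs = [(_hash(letter_map, token.upper()), token.upper()) for token in vocabulary]
--     keys = list(dict.fromkeys(h for h, _ in pairs))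
--     return {h: [u for h2, u in pairs if h2 == h] for h in keys}
-- ===== Notes on version B (the rewrite author's own statement) =====
-- stated objective: alternative
-- what changed: A builds the groups in one pass by bucketing into a dict keyed by hash; B computes the (hash, uppercased) pair list once, dedups the hashes in first-occurrence order, and builds each equivalence class by filtering the pair list.
import Mathlib
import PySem

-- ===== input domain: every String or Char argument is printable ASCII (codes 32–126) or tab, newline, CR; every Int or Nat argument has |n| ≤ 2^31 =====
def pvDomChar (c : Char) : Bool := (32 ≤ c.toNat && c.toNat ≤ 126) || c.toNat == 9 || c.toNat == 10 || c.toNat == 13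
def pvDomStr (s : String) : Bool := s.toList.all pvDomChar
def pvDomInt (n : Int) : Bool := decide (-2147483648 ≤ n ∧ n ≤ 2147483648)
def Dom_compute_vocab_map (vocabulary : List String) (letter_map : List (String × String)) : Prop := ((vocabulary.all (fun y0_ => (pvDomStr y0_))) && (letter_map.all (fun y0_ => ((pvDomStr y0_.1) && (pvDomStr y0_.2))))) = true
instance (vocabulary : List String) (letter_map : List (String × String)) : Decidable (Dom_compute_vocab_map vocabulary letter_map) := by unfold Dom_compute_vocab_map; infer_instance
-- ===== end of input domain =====

-- B replaces A's one-pass dict bucketing by a two-pass pair-list / ordered-dedup / comprehension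
-- decomposition (objective: alternative; same result, no speed claim).

-- ===== PORT A =====
-- "".join([letter_map[char] for char in word]); lookup is total via getD "" — inputs where the
-- Python raises KeyError (a character missing from letter_map) are excluded by Pre_ below.
def pvHash (letter_map : List (String × String)) (word : String) : String :=
  PySem.Str.join "" (word.toList.map (fun c => PySem.Dict.getD (PySem.Dict.mk letter_map) (String.ofList [c]) ""))

def compute_vocab_map (vocabulary : List String) (letter_map : List (String × String)) : List (String × List String) :=
  (vocabulary.foldl (fun (vocab_map : PySem.Dict String (List String)) token =>
      let uppercased_token := PySem.Str.upper token
      let tokenhash := pvHash letter_map uppercased_token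
      if PySem.Dict.contains vocab_map tokenhash then
        vocab_map.insert tokenhash (vocab_map.getD tokenhash [] ++ [uppercased_token])
      else
        vocab_map.insert tokenhash [uppercased_token]) PySem.Dict.empty).items

-- ===== PORT B =====
def compute_vocab_map_alt (vocabulary : List String) (letter_map : List (String × String)) : List (String × List String) :=
  let pairs := vocabulary.map (fun token =>
    let u := PySem.Str.upper token
    (pvHash letter_map u, u))
  let keys := PySem.List.dedup (pairs.map Prod.fst)   -- list(dict.fromkeys(…))
  keys.map (fun h => (h, (pairs.filter (fun p => p.1 == h)).map Prod.snd))

-- ===== PRECONDITION & SPEC =====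
-- Pre_ excludes exactly the inputs where Python A raises KeyError: some character of some
-- uppercased token is missing from letter_map.
def Pre_compute_vocab_map (vocabulary : List String) (letter_map : List (String × String)) : Prop :=
  (vocabulary.all (fun tok => (PySem.Str.upper tok).toList.all
    (fun c => PySem.Dict.contains (PySem.Dict.mk letter_map) (String.ofList [c])))) = true
instance (vocabulary : List String) (letter_map : List (String × String)) : Decidable (Pre_compute_vocab_map vocabulary letter_map) := by unfold Pre_compute_vocab_map; infer_instance

def pvWitness_compute_vocab_map : List String × (List (String × String)) :=
  (["ab", "xy", "g"], [("A", "1"), ("B", "2"), ("X", "3"), ("Y", "4"), ("G", "5")])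

def Spec_compute_vocab_map (vocabulary : List String) (letter_map : List (String × String)) (out : List (String × List String)) : Prop := out = compute_vocab_map_alt vocabulary letter_map
instance (vocabulary : List String) (letter_map : List (String × String)) (out : List (String × List String)) : Decidable (Spec_compute_vocab_map vocabulary letter_map out) := by unfold Spec_compute_vocab_map; infer_instance

-- ===== CLAIM (what is proved, stated in full; the proofs are below) =====
def Claim_equal_compute_vocab_map : Prop := ∀ (vocabulary : List String) (letter_map : List (String × String)), Dom_compute_vocab_map vocabulary letter_map → Pre_compute_vocab_map vocabulary letter_map → Spec_compute_vocab_map vocabulary letter_map (compute_vocab_map vocabulary letter_map)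

-- ===== LEMMAS AND PROOFS =====

-- A's loop body (read, append, store / fresh insert) is exactly one Dict.modify.
lemma stepA_eq_modify (letter_map : List (String × String)) :
    (fun (vocab_map : PySem.Dict String (List String)) (token : String) =>
      let uppercased_token := PySem.Str.upper token
      let tokenhash := pvHash letter_map uppercased_token
      if PySem.Dict.contains vocab_map tokenhash then
        vocab_map.insert tokenhash (vocab_map.getD tokenhash [] ++ [uppercased_token])
      else
        vocab_map.insert tokenhash [uppercased_token])
    = fun vocab_map token =>
        PySem.Dict.modify vocab_map (pvHash letter_map (PySem.Str.upper token)) []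
          (fun xs => xs ++ [PySem.Str.upper token]) := by
  funext d token
  by_cases hc : PySem.Dict.contains d (pvHash letter_map (PySem.Str.upper token)) = true
  · simp [hc, PySem.Dict.modify]
  · simp only [Bool.not_eq_true] at hc
    simp [hc, PySem.Dict.modify, PySem.Dict.getD_of_not_contains _ _ hc]

-- grouping a pair list with a Dict.modify loop = ordered-dedup keys paired with their filters
lemma grouping_items (ps : List (String × String)) :
    (ps.foldl (fun (d : PySem.Dict String (List String)) p =>
        d.modify p.1 [] (fun xs => xs ++ [p.2])) PySem.Dict.empty).items
    = (PySem.List.dedup (ps.map Prod.fst)).map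
        (fun h => (h, (ps.filter (fun p => p.1 == h)).map Prod.snd)) := by
  have hnd : (ps.foldl (fun (d : PySem.Dict String (List String)) p =>
      d.modify p.1 [] (fun xs => xs ++ [p.2])) PySem.Dict.empty).keys.Nodup :=
    PySem.Dict.nodup_keys_foldl_modify_key ps Prod.fst [] (fun _ p xs => xs ++ [p.2])
      PySem.Dict.empty PySem.Dict.nodup_keys_empty
  rw [PySem.Dict.items_eq_map_keys _ hnd []]
  rw [PySem.Dict.keys_foldl_modify_key ps Prod.fst [] (fun _ p xs => xs ++ [p.2]) PySem.Dict.empty]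
  apply List.map_congr_left
  intro h _
  rw [PySem.Dict.getD_foldl_modify_append]
  simp

-- ===== VERDICT (by name: the statement is the Claim_ definition above) =====
theorem compute_vocab_map_spec : Claim_equal_compute_vocab_map := by
  intro vocabulary letter_map _ _
  unfold Spec_compute_vocab_map compute_vocab_map compute_vocab_map_alt
  rw [stepA_eq_modify letter_map]
  have h := grouping_items (vocabulary.map (fun token =>
    (pvHash letter_map (PySem.Str.upper token), PySem.Str.upper token)))
  rw [List.foldl_map] at h
  simpa using h
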